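-- pv_equiv track=rewrite | github.com/pedromouzinho/dbde_ai_assistant-main | scripts/build_story_repo_phase1_assets.py | select_primary_spec_member
-- ===== SOURCE A (Python) =====
-- def select_primary_spec_member(names: list[str]) -> str:
--     preferred = [
--         "src/swagger.json",
--         "src/openapi.json",
--         "swagger.json",
--         "openapi.json",
--     ]
--     for item in preferred:
--         if item in names:
--             return item
--     candidates = [
--         name
--         for name in names
--         if name.lower().endswith("/swagger.json") or name.lower().endswith("/openapi.json")
--     ]
--     if not candidates:
--         return ""
--     return sorted(candidates, key=lambda item: (item.count("/"), len(item)))[0]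
-- ===== SOURCE B (Python) =====
-- def select_primary_spec_member(names: list[str]) -> str:
--     preferred = [
--         "src/swagger.json",
--         "src/openapi.json",
--         "swagger.json",
--         "openapi.json",
--     ]
--     best = None
--     best_key = None
--     for name in names:
--         if name in preferred:
--             key = (0, preferred.index(name), 0)
--         else:
--             low = name.lower()
--             if low.endswith("/swagger.json") or low.endswith("/openapi.json"):
--                 key = (1, name.count("/"), len(name))
--             else:
--                 continue
--         if best_key is None or key < best_key:
--             best_key = key
--             best = name
--     return best if best is not None else ""
-- ===== Notes on version B (the rewrite author's own statement) =====
-- stated objective: alternative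
-- what changed: Replaced A's three stages (preferred-list membership loop, suffix filter, sorted()[0]) by a single pass over names that keeps the argmin under one lexicographic score key (preferred names score (0, preferred_index, 0), suffix candidates (1, slash_count, length)).
import Mathlib
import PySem

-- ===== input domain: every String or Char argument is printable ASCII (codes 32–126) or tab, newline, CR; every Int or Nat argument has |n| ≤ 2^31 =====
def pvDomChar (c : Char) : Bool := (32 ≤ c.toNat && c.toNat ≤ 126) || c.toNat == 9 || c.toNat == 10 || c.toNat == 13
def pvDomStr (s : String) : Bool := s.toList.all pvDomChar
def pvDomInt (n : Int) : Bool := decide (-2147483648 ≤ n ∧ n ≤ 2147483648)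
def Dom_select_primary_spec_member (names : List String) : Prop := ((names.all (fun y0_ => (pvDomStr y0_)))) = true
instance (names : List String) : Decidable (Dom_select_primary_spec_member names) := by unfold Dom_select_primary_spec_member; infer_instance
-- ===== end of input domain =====

-- B replaces A's preferred-loop + filter + sorted()[0] by one scoring pass keeping the
-- argmin under a lexicographic key (alternative decomposition; same return value).

-- ===== PORT A =====
def pvPreferred : List String :=
  ["src/swagger.json", "src/openapi.json", "swagger.json", "openapi.json"]

-- 'for item in preferred: if item in names: return item'
def pvPrefLoop (pref : List String) (names : List String) : Option String :=
  match pref with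
  | [] => none
  | item :: rest => if names.contains item then some item else pvPrefLoop rest names

def pvIsCand (name : String) : Bool :=
  PySem.Str.endswith (PySem.Str.lower name) "/swagger.json" ||
  PySem.Str.endswith (PySem.Str.lower name) "/openapi.json"

def select_primary_spec_member (names : List String) : String :=
  match pvPrefLoop pvPreferred names with
  | some item => item
  | none =>
    let candidates := names.filter pvIsCand
    if candidates.isEmpty then ""
    else (PySem.List.sorted2 candidates
            (fun item => (PySem.Str.count item "/" : Int))
            (fun item => PySem.Str.len item)).headD ""

-- ===== PORT B =====
-- Python tuple '<' on int triples, lexicographic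
def pvKeyLt (x y : Int × Int × Int) : Bool :=
  decide (x.1 < y.1) ||
    (x.1 == y.1 && (decide (x.2.1 < y.2.1) || (x.2.1 == y.2.1 && decide (x.2.2 < y.2.2))))

def pvScore (name : String) : Option (Int × Int × Int) :=
  match PySem.List.index? pvPreferred name with
  | some i => some (0, (i : Int), 0)
  | none =>
    if PySem.Str.endswith (PySem.Str.lower name) "/swagger.json" ||
       PySem.Str.endswith (PySem.Str.lower name) "/openapi.json" then
      some (1, (PySem.Str.count name "/" : Int), PySem.Str.len name)
    else none

def pvStep (best : Option ((Int × Int × Int) × String)) (name : String) :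
    Option ((Int × Int × Int) × String) :=
  match pvScore name with
  | none => best
  | some k =>
    match best with
    | none => some (k, name)
    | some (bk, bn) => if pvKeyLt k bk then some (k, name) else some (bk, bn)

def select_primary_spec_member_alt (names : List String) : String :=
  match names.foldl pvStep none with
  | some (_, n) => n
  | none => ""

-- ===== PRECONDITION & SPEC =====
def Spec_select_primary_spec_member (names : List String) (out : String) : Prop := out = select_primary_spec_member_alt names
instance (names : List String) (out : String) : Decidable (Spec_select_primary_spec_member names out) := by unfold Spec_select_primary_spec_member; infer_instance

-- ===== CLAIM (what is proved, stated in full; the proofs are below) =====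
def Claim_equal_select_primary_spec_member : Prop := ∀ (names : List String), Dom_select_primary_spec_member names → Spec_select_primary_spec_member names (select_primary_spec_member names)

-- ===== LEMMAS AND PROOFS =====

-- the min-keeping step on scored pairs
def pvGmin (acc : Option ((Int × Int × Int) × String)) (p : (Int × Int × Int) × String) :
    Option ((Int × Int × Int) × String) :=
  match acc with
  | none => some p
  | some a => if pvKeyLt p.1 a.1 then some p else some a

def pvScored (names : List String) : List ((Int × Int × Int) × String) :=
  names.filterMap (fun n => (pvScore n).map (fun k => (k, n)))

theorem pv_not_mem_of_contains_false {x : String} {l : List String}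
    (h : l.contains x = false) : x ∉ l := by
  simpa using h

theorem pvPrefLoop_none {pref names : List String} (h : pvPrefLoop pref names = none) :
    ∀ p ∈ pref, p ∉ names := by
  induction pref with
  | nil => simp
  | cons q rest ih =>
    rw [pvPrefLoop] at h
    by_cases hq : names.contains q = true
    · rw [if_pos hq] at h; exact absurd h (by simp)
    · rw [Bool.not_eq_true] at hq
      rw [if_neg (by simpa using pv_not_mem_of_contains_false hq)] at h
      intro p hp hpn
      rcases List.mem_cons.mp hp with rfl | hm
      · exact (pv_not_mem_of_contains_false hq) hpn
      · exact ih h p hm hpn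

theorem pvKeyLt_false_trans {a b c : Int × Int × Int}
    (h1 : pvKeyLt b a = false) (h2 : pvKeyLt c b = false) : pvKeyLt c a = false := by
  obtain ⟨a1, a2, a3⟩ := a; obtain ⟨b1, b2, b3⟩ := b; obtain ⟨c1, c2, c3⟩ := c
  simp only [pvKeyLt, Bool.or_eq_false_iff, Bool.and_eq_false_iff, decide_eq_false_iff_not,
    beq_eq_false_iff_ne, ne_eq] at *
  omega

theorem pvKeyLt_le_lt {p r a : Int × Int × Int}
    (h1 : pvKeyLt p r = false) (h2 : pvKeyLt p a = true) : pvKeyLt a r = false := by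
  obtain ⟨a1, a2, a3⟩ := a; obtain ⟨p1, p2, p3⟩ := p; obtain ⟨r1, r2, r3⟩ := r
  simp only [pvKeyLt, Bool.or_eq_false_iff, Bool.and_eq_false_iff, decide_eq_false_iff_not,
    beq_eq_false_iff_ne, ne_eq, Bool.or_eq_true, Bool.and_eq_true, decide_eq_true_eq,
    beq_iff_eq] at *
  omega

theorem pvKeyLt_irrefl (a : Int × Int × Int) : pvKeyLt a a = false := by
  obtain ⟨a1, a2, a3⟩ := a
  simp [pvKeyLt]

-- the fold over names is the min-fold over the scored list
theorem foldl_step_eq (names : List String) (acc : Option ((Int × Int × Int) × String)) :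
    names.foldl pvStep acc = (pvScored names).foldl pvGmin acc := by
  induction names generalizing acc with
  | nil => rfl
  | cons n t ih =>
    simp only [pvScored, List.filterMap_cons, List.foldl_cons]
    cases h : pvScore n with
    | none => simpa [pvStep, h, pvScored] using ih acc
    | some k =>
      simp only [Option.map_some, List.foldl_cons]
      rw [show pvStep acc n = pvGmin acc (k, n) by
            cases acc with
            | none => simp [pvStep, pvGmin, h]
            | some a => cases a; simp [pvStep, pvGmin, h]]
      simpa [pvScored] using ih (pvGmin acc (k, n))

theorem pvScored_cons_none {n : String} (t : List String) (h : pvScore n = none) :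
    pvScored (n :: t) = pvScored t := by
  simp [pvScored, h]

theorem pvScored_cons_some {n : String} {k : Int × Int × Int} (t : List String)
    (h : pvScore n = some k) : pvScored (n :: t) = (k, n) :: pvScored t := by
  simp [pvScored, h]

-- running the min-fold from 'some a' yields a minimal element
theorem pvGmin_run (l : List ((Int × Int × Int) × String)) (a : (Int × Int × Int) × String) :
    ∃ r, l.foldl pvGmin (some a) = some r ∧ (r = a ∨ r ∈ l) ∧
      pvKeyLt a.1 r.1 = false ∧ ∀ b ∈ l, pvKeyLt b.1 r.1 = false := by
  induction l generalizing a with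
  | nil => exact ⟨a, rfl, Or.inl rfl, pvKeyLt_irrefl _, by simp⟩
  | cons p t ih =>
    by_cases hlt : pvKeyLt p.1 a.1 = true
    · obtain ⟨r, hr, hmem, hle, hall⟩ := ih p
      refine ⟨r, by simpa [pvGmin, hlt] using hr, ?_, ?_, ?_⟩
      · rcases hmem with h | h
        · exact Or.inr (by simp [h])
        · exact Or.inr (List.mem_cons_of_mem _ h)
      · exact pvKeyLt_le_lt hle hlt
      · intro b hb
        rcases List.mem_cons.mp hb with h | h
        · exact h ▸ hle
        · exact hall b h
    · rw [Bool.not_eq_true] at hlt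
      obtain ⟨r, hr, hmem, hle, hall⟩ := ih a
      refine ⟨r, by simpa [pvGmin, hlt] using hr, ?_, hle, ?_⟩
      · rcases hmem with h | h
        · exact Or.inl h
        · exact Or.inr (List.mem_cons_of_mem _ h)
      · intro b hb
        rcases List.mem_cons.mp hb with h | h
        · exact h ▸ pvKeyLt_false_trans hle hlt
        · exact hall b h

theorem pvGmin_main (l : List ((Int × Int × Int) × String)) (hne : l ≠ []) :
    ∃ r, l.foldl pvGmin none = some r ∧ r ∈ l ∧ ∀ b ∈ l, pvKeyLt b.1 r.1 = false := by
  cases l with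
  | nil => exact absurd rfl hne
  | cons p t =>
    obtain ⟨r, hr, hmem, hle, hall⟩ := pvGmin_run t p
    refine ⟨r, by simpa [pvGmin] using hr, ?_, ?_⟩
    · rcases hmem with h | h
      · exact h ▸ List.mem_cons_self
      · exact List.mem_cons_of_mem _ h
    · intro b hb
      rcases List.mem_cons.mp hb with h | h
      · exact h ▸ hle
      · exact hall b h

-- head of an insertBy-insertion
theorem head?_insertBy (lt : String → String → Bool) (x : String) (ys : List String) :
    (PySem.List.insertBy lt x ys).head? =
      some (match ys.head? with | none => x | some y => if lt x y then x else y) := by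
  cases ys with
  | nil => simp [PySem.List.insertBy]
  | cons y t =>
    by_cases h : lt x y = true
    · simp [PySem.List.insertBy, h]
    · rw [Bool.not_eq_true] at h
      simp [PySem.List.insertBy, h]

def pvGhead (lt : String → String → Bool) (o : Option String) (x : String) : Option String :=
  match o with
  | none => some x
  | some y => some (if lt x y then x else y)

theorem head?_foldl_insertBy (lt : String → String → Bool) (xs : List String)
    (acc : List String) :
    (xs.foldl (fun a x => PySem.List.insertBy lt x a) acc).head? =
      xs.foldl (pvGhead lt) acc.head? := by
  induction xs generalizing acc with
  | nil => rfl
  | cons x t ih =>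
    simp only [List.foldl_cons]
    rw [ih, show (PySem.List.insertBy lt x acc).head? = pvGhead lt acc.head? x by
          rw [head?_insertBy]; cases acc <;> rfl]

-- the combined strict order used by sorted2 with keys (count '/', len)
def pvLt (a b : String) : Bool :=
  decide ((PySem.Str.count a "/" : Int) < (PySem.Str.count b "/" : Int)) ||
    (!decide ((PySem.Str.count b "/" : Int) < (PySem.Str.count a "/" : Int)) &&
      decide (PySem.Str.len a < PySem.Str.len b))

def pvF (n : String) : (Int × Int × Int) × String :=
  ((1, (PySem.Str.count n "/" : Int), PySem.Str.len n), n)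

theorem pvKeyLt_pvF (x a : String) : pvKeyLt (pvF x).1 (pvF a).1 = pvLt x a := by
  rw [Bool.eq_iff_iff]
  simp only [pvKeyLt, pvF, pvLt, Bool.or_eq_true, Bool.and_eq_true, Bool.not_eq_true',
    decide_eq_true_eq, decide_eq_false_iff_not, beq_iff_eq, lt_self_iff_false, false_or,
    true_and]
  omega

theorem foldl_gmin_map (xs : List String) (acc : Option String) :
    (xs.map pvF).foldl pvGmin (acc.map pvF) = (xs.foldl (pvGhead pvLt) acc).map pvF := by
  induction xs generalizing acc with
  | nil => rfl
  | cons x t ih =>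
    simp only [List.map_cons, List.foldl_cons]
    rw [show pvGmin (acc.map pvF) (pvF x) = (pvGhead pvLt acc x).map pvF by
          cases acc with
          | none => rfl
          | some a =>
            simp only [Option.map_some, pvGmin, pvGhead, pvKeyLt_pvF]
            by_cases h : pvLt x a = true
            · simp [h]
            · rw [Bool.not_eq_true] at h; simp [h]]
    exact ih _

-- when no preferred name occurs, the scored list is the mapped candidate list
theorem pvScored_of_no_pref (names : List String)
    (h : ∀ p ∈ pvPreferred, p ∉ names) :
    pvScored names = (names.filter pvIsCand).map pvF := by
  induction names with
  | nil => rfl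
  | cons n t ih =>
    have hn : ∀ p ∈ pvPreferred, p ∉ t := fun p hp hm => h p hp (List.mem_cons_of_mem _ hm)
    have hidx : PySem.List.index? pvPreferred n = none := by
      have : n ∉ pvPreferred := fun hmem => h n hmem List.mem_cons_self
      simp only [pvPreferred, List.mem_cons, List.not_mem_nil, or_false, not_or] at this
      obtain ⟨h1, h2, h3, h4⟩ := this
      simp [PySem.List.index?, pvPreferred, h1, h2, h3, h4]
    by_cases hc : pvIsCand n = true
    · have hsc : pvScore n = some (1, (PySem.Str.count n "/" : Int), PySem.Str.len n) := by
        simp only [pvIsCand, Bool.or_eq_true] at hc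
        simp only [pvScore, hidx]
        rw [if_pos (by simpa using hc)]
      rw [pvScored_cons_some t hsc, List.filter_cons_of_pos hc, List.map_cons]
      exact congrArg₂ List.cons rfl (ih hn)
    · have hsc : pvScore n = none := by
        simp only [pvIsCand, Bool.or_eq_true] at hc
        simp only [pvScore, hidx]
        rw [if_neg (by simpa using hc)]
      rw [pvScored_cons_none t hsc, List.filter_cons_of_neg (by simpa using hc)]
      exact ih hn

theorem index?_pvPreferred (n : String) (i : Nat)
    (h : PySem.List.index? pvPreferred n = some i) :
    i < 4 ∧ pvPreferred[i]? = some n := by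
  by_cases h1 : n = "src/swagger.json"
  · subst h1
    rw [show PySem.List.index? pvPreferred "src/swagger.json" = some 0 from by decide] at h
    injection h with h; subst h; decide
  by_cases h2 : n = "src/openapi.json"
  · subst h2
    rw [show PySem.List.index? pvPreferred "src/openapi.json" = some 1 from by decide] at h
    injection h with h; subst h; decide
  by_cases h3 : n = "swagger.json"
  · subst h3
    rw [show PySem.List.index? pvPreferred "swagger.json" = some 2 from by decide] at h
    injection h with h; subst h; decide
  by_cases h4 : n = "openapi.json"
  · subst h4
    rw [show PySem.List.index? pvPreferred "openapi.json" = some 3 from by decide] at h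
    injection h with h; subst h; decide
  · exfalso
    have h1' : (("src/swagger.json" : String) == n) = false := by rw [beq_eq_false_iff_ne]; exact Ne.symm h1
    have h2' : (("src/openapi.json" : String) == n) = false := by rw [beq_eq_false_iff_ne]; exact Ne.symm h2
    have h3' : (("swagger.json" : String) == n) = false := by rw [beq_eq_false_iff_ne]; exact Ne.symm h3
    have h4' : (("openapi.json" : String) == n) = false := by rw [beq_eq_false_iff_ne]; exact Ne.symm h4
    simp [PySem.List.index?, pvPreferred, List.idxOf?, List.findIdx?, List.findIdx?.go, h1', h2', h3', h4'] at h

-- main lemma for the case where the preferred loop fires at index i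
theorem pref_case (names : List String) (i : Nat) (hi : i < 4)
    (hmem : pvPreferred[i]! ∈ names)
    (hbefore : ∀ j : Nat, j < i → pvPreferred[j]! ∉ names) :
    select_primary_spec_member_alt names = pvPreferred[i]! := by
  have hscore : pvScore pvPreferred[i]! = some (0, (i : Int), 0) := by
    interval_cases i <;> decide
  have hpair : ((((0 : Int), (i : Int), (0 : Int))), pvPreferred[i]!) ∈ pvScored names := by
    simp only [pvScored, List.mem_filterMap]
    exact ⟨pvPreferred[i]!, hmem, by rw [hscore]; rfl⟩
  have hne : pvScored names ≠ [] := fun h => by simp [h] at hpair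
  obtain ⟨r, hr, hrmem, hall⟩ := pvGmin_main _ hne
  have hmin := hall _ hpair
  -- r comes from some scored name
  simp only [pvScored, List.mem_filterMap] at hrmem
  obtain ⟨n, hn_mem, hn_sc⟩ := hrmem
  cases hsc : pvScore n with
  | none => simp [hsc] at hn_sc
  | some k =>
    simp only [hsc, Option.map_some, Option.some.injEq] at hn_sc
    obtain ⟨k1, k2, k3⟩ := k
    have hr1 : r.1 = (k1, k2, k3) := by rw [← hn_sc]
    have hr2 : r.2 = n := by rw [← hn_sc]
    rw [hr1] at hmin
    simp only [pvKeyLt, Bool.or_eq_false_iff, Bool.and_eq_false_iff, decide_eq_false_iff_not,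
      beq_eq_false_iff_ne, ne_eq] at hmin
    -- pvScore n is either a preferred score (0,j,0) or a candidate score (1,_,_)
    cases hidx : PySem.List.index? pvPreferred n with
    | some m =>
      -- preferred branch: n = pvPreferred[m] with m ≤ i, and m < i impossible
      have hk : k1 = 0 ∧ k2 = (m : Int) ∧ k3 = 0 := by
        simp only [pvScore, hidx, Option.some.injEq, Prod.mk.injEq] at hsc
        exact ⟨hsc.1.symm, hsc.2.1.symm, hsc.2.2.symm⟩
      obtain ⟨hk1, hk2, hk3⟩ := hk
      obtain ⟨hm4, hget⟩ := index?_pvPreferred n m hidx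
      have hn_eq_m : pvPreferred[m]! = n := by
        simp [List.getElem!_eq_getElem?_getD, hget]
      have hmeq : m = i := by
        have hmle : m ≤ i := by subst hk1 hk2 hk3; omega
        rcases Nat.lt_or_ge m i with hlt | _
        · exact absurd (hn_eq_m ▸ hn_mem) (hbefore m hlt)
        · omega
      unfold select_primary_spec_member_alt
      rw [foldl_step_eq, hr]
      obtain ⟨rk, rn⟩ := r
      simp only at hr2
      rw [hr2]
      exact (hmeq ▸ hn_eq_m).symm ▸ rfl
    | none =>
      -- candidate branch is beaten by the preferred pair: contradiction
      exfalso
      have hk1 : k1 = 1 := by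
        simp only [pvScore, hidx] at hsc
        split at hsc
        · simp only [Option.some.injEq, Prod.mk.injEq] at hsc; omega
        · exact absurd hsc (by simp)
      subst hk1
      omega

-- ===== VERDICT (by name: the statement is the Claim_ definition above) =====
theorem select_primary_spec_member_spec : Claim_equal_select_primary_spec_member := by
  intro names _
  unfold Spec_select_primary_spec_member
  unfold select_primary_spec_member
  cases hp : pvPrefLoop pvPreferred names with
  | some item =>
    -- one of the four preferred names is present
    simp only [pvPrefLoop, pvPreferred] at hp
    by_cases h1 : names.contains "src/swagger.json" = true
    · rw [if_pos h1] at hp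
      injection hp with hp; subst hp
      exact ((pref_case names 0 (by omega) (by simpa using h1)
        (by intro j hj; omega))).symm
    · rw [Bool.not_eq_true] at h1; rw [if_neg (by simpa using pv_not_mem_of_contains_false h1)] at hp
      by_cases h2 : names.contains "src/openapi.json" = true
      · rw [if_pos h2] at hp
        injection hp with hp; subst hp
        exact ((pref_case names 1 (by omega) (by simpa using h2)
          (by intro j hj
              interval_cases j
              exact pv_not_mem_of_contains_false h1))).symm
      · rw [Bool.not_eq_true] at h2; rw [if_neg (by simpa using pv_not_mem_of_contains_false h2)] at hp
        by_cases h3 : names.contains "swagger.json" = true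
        · rw [if_pos h3] at hp
          injection hp with hp; subst hp
          exact ((pref_case names 2 (by omega) (by simpa using h3)
            (by intro j hj
                interval_cases j
                · exact pv_not_mem_of_contains_false h1
                · exact pv_not_mem_of_contains_false h2))).symm
        · rw [Bool.not_eq_true] at h3; rw [if_neg (by simpa using pv_not_mem_of_contains_false h3)] at hp
          by_cases h4 : names.contains "openapi.json" = true
          · rw [if_pos h4] at hp
            injection hp with hp; subst hp
            exact ((pref_case names 3 (by omega) (by simpa using h4)
              (by intro j hj
                  interval_cases j
                  · exact pv_not_mem_of_contains_false h1
                  · exact pv_not_mem_of_contains_false h2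
                  · exact pv_not_mem_of_contains_false h3))).symm
          · rw [Bool.not_eq_true] at h4; rw [if_neg (by simpa using pv_not_mem_of_contains_false h4)] at hp
            exact absurd hp (by simp)
  | none =>
    -- no preferred name present
    have hnp : ∀ p ∈ pvPreferred, p ∉ names := pvPrefLoop_none hp
    unfold select_primary_spec_member_alt
    rw [foldl_step_eq, pvScored_of_no_pref names hnp]
    by_cases hc : names.filter pvIsCand = []
    · simp [hc]
    · rw [if_neg (by simpa [List.isEmpty_iff] using hc)]
      have hmap := foldl_gmin_map (names.filter pvIsCand) none
      simp only [Option.map_none] at hmap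
      rw [hmap]
      have hhead : (PySem.List.sorted2 (names.filter pvIsCand)
          (fun item => (PySem.Str.count item "/" : Int))
          (fun item => PySem.Str.len item)).head? =
          (names.filter pvIsCand).foldl (pvGhead pvLt) none := by
        show (List.foldl (fun acc x => PySem.List.insertBy _ x acc) [] _).head? = _
        rw [head?_foldl_insertBy]
        rfl
      cases hres : (names.filter pvIsCand).foldl (pvGhead pvLt) none with
      | none =>
        exfalso
        cases hcc : names.filter pvIsCand with
        | nil => exact hc hcc
        | cons c cs =>
          rw [hcc] at hres
          have : ∀ (l : List String) (y : String), l.foldl (pvGhead pvLt) (some y) ≠ none := by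
            intro l
            induction l with
            | nil => intro y h; exact absurd h (by simp)
            | cons z t ih => intro y; simpa [pvGhead] using ih _
          exact this cs c (by simpa [pvGhead] using hres)
      | some m =>
        rw [hres] at hhead
        simp only [Option.map_some]
        have : (PySem.List.sorted2 (names.filter pvIsCand)
            (fun item => (PySem.Str.count item "/" : Int))
            (fun item => PySem.Str.len item)).headD "" = m := by
          rw [List.headD_eq_head?_getD, hhead]
          rfl
        rw [this]
        rfl
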